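-- pv_equiv track=rewrite | github.com/zzhang2293/leetcode | monotone_stack/stack.py | stack
-- ===== SOURCE A (Python) =====
-- def stack(arr: list):
--     record = []
--     ans = {}
--     for ind, val in enumerate(arr):
--         if not record or record[-1][1] < val:
--             record.append([ind, val])
--         elif record and record[-1][1] >= val:
--             while record and record[-1][1] >= val:
--                 k, v = record.pop(-1)
--                 ans[k] = {"left": record[-1][0] if record else -1, "right": ind, "val": v}
--             record.append([ind, val])
--
--     while record:
--         ind, val = record.pop(-1)
--         ans[ind] = {"left": record[-1][0] if record else -1, "right": -1, "val": val}
--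
--     for key in ans:
--         l, r, v = ans[key].values()
--         while r != -1 and v == arr[r]:
--             v = ans[r]["val"]
--             r = ans[r]["right"]
--         ans[key]["right"] = r
--     res = []
--     for i in range(len(arr)):
--         res.append([ans[i]["left"], ans[i]["right"]])
--
--     return res
-- ===== SOURCE B (Python) =====
-- def stack(arr: list):
--     # For each index: nearest index to the left with a strictly smaller value,
--     # and nearest index to the right with a strictly smaller value (-1 if none),
--     # each found by a direct outward scan -- no stack, no dict, no fix-up pass.
--     n = len(arr)
--     res = []
--     for i in range(n):
--         left = i - 1
--         while left >= 0 and arr[left] >= arr[i]: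
--             left -= 1
--         right = i + 1
--         while right < n and arr[right] >= arr[i]:
--             right += 1
--         res.append([left, -1 if right == n else right])
--     return res
-- ===== Notes on version B (the rewrite author's own statement) =====
-- stated objective: simpler
-- what changed: A's single forward pass with a monotone stack, an insertion-ordered dict of {left,right,val} records and a second equal-value chain-following fix-up pass is replaced by two direct outward scans per index (walk left / walk right until a strictly smaller value), with no stack, no dict and no fix-up.
import Mathlib
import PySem

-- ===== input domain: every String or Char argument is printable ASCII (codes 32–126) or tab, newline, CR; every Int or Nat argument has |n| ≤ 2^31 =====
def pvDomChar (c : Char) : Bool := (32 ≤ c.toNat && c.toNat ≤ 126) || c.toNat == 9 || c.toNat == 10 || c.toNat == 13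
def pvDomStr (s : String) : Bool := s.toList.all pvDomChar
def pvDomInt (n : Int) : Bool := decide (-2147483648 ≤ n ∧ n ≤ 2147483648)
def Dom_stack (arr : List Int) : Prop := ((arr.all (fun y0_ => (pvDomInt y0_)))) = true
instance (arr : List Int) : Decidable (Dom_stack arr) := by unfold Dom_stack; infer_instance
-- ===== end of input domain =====

-- B replaces A's stack + dict + equal-value chain fix-up with two direct outward scans per
-- index (nearest strictly smaller neighbour on each side): shorter and plainer, same results.

-- ===== PORT A =====
-- record[-1] is the head of the list (stack top at the front); pvLeftTop record is
-- "record[-1][0] if record else -1".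
def pvLeftTop : List (Int × Int) → Int
  | [] => -1
  | (j, _) :: _ => j

-- "while record and record[-1][1] >= val: k, v = record.pop(-1); ans[k] = {...}"
def pvPopLoop (ind val : Int) : List (Int × Int) → PySem.Dict Int (Int × Int × Int) →
    List (Int × Int) × PySem.Dict Int (Int × Int × Int)
  | [], ans => ([], ans)
  | (k, v) :: rest, ans =>
    if val ≤ v then pvPopLoop ind val rest (ans.insert k (pvLeftTop rest, ind, v))
    else ((k, v) :: rest, ans)

-- one iteration of "for ind, val in enumerate(arr)"; the dict value {"left","right","val"}
-- is the triple (left, right, val).  The elif guard "record and record[-1][1] >= val" is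
-- the exact complement of the if guard when record is nonempty, hence the plain else.
def pvStepA (st : List (Int × Int) × PySem.Dict Int (Int × Int × Int)) (p : Int × Int) :
    List (Int × Int) × PySem.Dict Int (Int × Int × Int) :=
  match st.1 with
  | [] => (p :: st.1, st.2)
  | (_, v0) :: _ =>
    if v0 < p.2 then (p :: st.1, st.2)
    else
      let r := pvPopLoop p.1 p.2 st.1 st.2
      (p :: r.1, r.2)

-- "while record: ind, val = record.pop(-1); ans[ind] = {...}"
def pvDrain : List (Int × Int) → PySem.Dict Int (Int × Int × Int) → PySem.Dict Int (Int × Int × Int)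
  | [], ans => ans
  | (ind, val) :: rest, ans => pvDrain rest (ans.insert ind (pvLeftTop rest, -1, val))

-- "while r != -1 and v == arr[r]: v = ans[r]["val"]; r = ans[r]["right"]".
-- fuel only makes the recursion total; arr.length + 1 steps always suffice (the proof
-- below shows r strictly increases).  The two fall-back `r` branches are unreachable
-- (they would be IndexError/KeyError in Python; the invariant keeps r a valid key).
def pvChase (arr : List Int) (ans : PySem.Dict Int (Int × Int × Int)) : Nat → Int → Int → Int
  | 0, _, r => r
  | fuel + 1, v, r =>
    if r ≠ -1 then
      match PySem.List.pyGet? arr r with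
      | some x =>
        if v = x then
          match ans.get? r with
          | some (_, r', v') => pvChase arr ans fuel v' r'
          | none => r
        else r
      | none => r
    else r

-- body of "for key in ans: l, r, v = ans[key].values(); while ...; ans[key]["right"] = r"
def pvFixStep (arr : List Int) (d : PySem.Dict Int (Int × Int × Int)) (key : Int) :
    PySem.Dict Int (Int × Int × Int) :=
  match d.get? key with
  | some (l, r, v) => d.insert key (l, pvChase arr d (arr.length + 1) v r, v)
  | none => d

def stack (arr : List Int) : List (List Int) :=
  let st := (PySem.List.enumerate arr).foldl pvStepA ([], PySem.Dict.empty)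
  let ans1 := pvDrain st.1 st.2
  let ans2 := ans1.keys.foldl (pvFixStep arr) ans1
  -- "for i in range(len(arr)): res.append([ans[i]["left"], ans[i]["right"]])";
  -- the none branch is unreachable (KeyError in Python: every index is a key).
  (List.range arr.length).map (fun i : Nat =>
    match ans2.get? (i : Int) with
    | some (l, r, _) => [l, r]
    | none => [])

-- ===== PORT B =====
-- "left = i - 1; while left >= 0 and arr[left] >= arr[i]: left -= 1"; the argument j is
-- left + 1, so j = 0 is left = -1.  arr.getD is arr[left], whose index is in range here.
def pvGoLeft (arr : List Int) (x : Int) : Nat → Int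
  | 0 => -1
  | j + 1 => if x ≤ arr.getD j 0 then pvGoLeft arr x j else (j : Int)

-- "right = i + 1; while right < n and arr[right] >= arr[i]: right += 1" followed by
-- "-1 if right == n else right", folded into the j = n base case.
def pvGoRight (arr : List Int) (x : Int) (j : Nat) : Int :=
  if h : j < arr.length then
    if x ≤ arr.getD j 0 then pvGoRight arr x (j + 1) else (j : Int)
  else -1
termination_by arr.length - j
decreasing_by omega

def stack_alt (arr : List Int) : List (List Int) :=
  (List.range arr.length).map (fun i =>
    [pvGoLeft arr (arr.getD i 0) i, pvGoRight arr (arr.getD i 0) (i + 1)])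

-- ===== PRECONDITION & SPEC =====
def Spec_stack (arr : List Int) (out : List (List Int)) : Prop := out = stack_alt arr
instance (arr : List Int) (out : List (List Int)) : Decidable (Spec_stack arr out) := by unfold Spec_stack; infer_instance

-- ===== CLAIM (what is proved, stated in full; the proofs are below) =====
def Claim_equal_stack : Prop := ∀ (arr : List Int), Dom_stack arr → Spec_stack arr (stack arr)

-- ===== LEMMAS AND PROOFS =====

-- Spec-side scan: first index m ≥ j with arr[m] ≤ x (as the Int index), else -1.
-- This is the "right" value A's forward pass stores before the equal-value fix-up.
def pvR0 (arr : List Int) (x : Int) (j : Nat) : Int :=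
  if h : j < arr.length then
    if arr.getD j 0 ≤ x then (j : Int) else pvR0 arr x (j + 1)
  else -1
termination_by arr.length - j
decreasing_by omega

-- k is on the monotone stack after the first i elements were processed
def pvInS (arr : List Int) (i k : Nat) : Prop :=
  k < i ∧ ∀ m : Nat, k < m → m < i → arr.getD k 0 < arr.getD m 0

def pvPair (arr : List Int) (k : Nat) : Int × Int := ((k : Int), arr.getD k 0)

-- dict contents after the first i elements were processed
def pvAnsP (arr : List Int) (i : Nat) (ans : PySem.Dict Int (Int × Int × Int)) : Prop :=
  (∀ k : Nat, k < i → ¬ pvInS arr i k →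
    ans.get? ↑k = some (pvGoLeft arr (arr.getD k 0) k, pvR0 arr (arr.getD k 0) (k + 1), arr.getD k 0)) ∧
  (∀ q : Int, (¬ ∃ k : Nat, q = ↑k ∧ k < i ∧ ¬ pvInS arr i k) → ans.get? q = none)

def pvInv (arr : List Int) (i : Nat) (record : List (Int × Int))
    (ans : PySem.Dict Int (Int × Int × Int)) : Prop :=
  ∃ S : List Nat, record = S.map (pvPair arr) ∧ S.Pairwise (· > ·) ∧
    (∀ m : Nat, m ∈ S ↔ pvInS arr i m) ∧ pvAnsP arr i ans

-- dict state during the fix-up pass: every key < n carries its left answer, its value,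
-- and either the pre-fix-up right (first ≤) or the final right (first <)
def pvMixed (arr : List Int) (ans : PySem.Dict Int (Int × Int × Int)) : Prop :=
  ∀ k : Nat, k < arr.length → ∃ r,
    ans.get? ↑k = some (pvGoLeft arr (arr.getD k 0) k, r, arr.getD k 0) ∧
    (r = pvR0 arr (arr.getD k 0) (k + 1) ∨ r = pvGoRight arr (arr.getD k 0) (k + 1))

-- invariant of the chain-walk "r": r is -1 with nothing ≤ arr[j] pending, or a valid
-- index right of j with arr[r] ≤ arr[j] and nothing smaller than arr[j] in between
def pvQ (arr : List Int) (j : Nat) (r : Int) : Prop :=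
  (r = -1 ∧ ∀ m : Nat, j < m → m < arr.length → arr.getD j 0 ≤ arr.getD m 0) ∨
  (∃ m0 : Nat, r = ↑m0 ∧ j < m0 ∧ m0 < arr.length ∧ arr.getD m0 0 ≤ arr.getD j 0 ∧
    ∀ m : Nat, j < m → m < m0 → arr.getD j 0 ≤ arr.getD m 0)

-- ----- scanner characterisations -----

theorem pvGoLeft_eq_neg (arr : List Int) (x : Int) (k : Nat)
    (h : ∀ j : Nat, j < k → x ≤ arr.getD j 0) : pvGoLeft arr x k = -1 := by
  induction k with
  | zero => rfl
  | succ k ih =>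
    simp only [pvGoLeft, if_pos (h k (Nat.lt_succ_self k))]
    exact ih fun j hj => h j (Nat.lt_succ_of_lt hj)

theorem pvGoLeft_eq_coe (arr : List Int) (x : Int) (j k : Nat) (hj : j < k)
    (hx : arr.getD j 0 < x) (hb : ∀ m : Nat, j < m → m < k → x ≤ arr.getD m 0) :
    pvGoLeft arr x k = (j : Int) := by
  induction k with
  | zero => omega
  | succ k ih =>
    by_cases hjk : j = k
    · subst hjk
      simp only [pvGoLeft]
      rw [if_neg (not_le.mpr hx)]
    · have hjk' : j < k := by omega
      simp only [pvGoLeft]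
      rw [if_pos (hb k hjk' (Nat.lt_succ_self k))]
      exact ih hjk' fun m h1 h2 => hb m h1 (Nat.lt_succ_of_lt h2)

theorem pvGoRight_eq_neg (arr : List Int) (x : Int) (j : Nat)
    (h : ∀ m : Nat, j ≤ m → m < arr.length → x ≤ arr.getD m 0) : pvGoRight arr x j = -1 := by
  have key : ∀ (c j : Nat), arr.length - j ≤ c →
      (∀ m : Nat, j ≤ m → m < arr.length → x ≤ arr.getD m 0) → pvGoRight arr x j = -1 := by
    intro c
    induction c with
    | zero => intro j hc h; rw [pvGoRight, dif_neg (by omega)]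
    | succ c ih =>
      intro j hc h
      rw [pvGoRight]
      by_cases hj : j < arr.length
      · rw [dif_pos hj, if_pos (h j le_rfl hj)]
        exact ih (j + 1) (by omega) (fun m hm1 hm2 => h m (by omega) hm2)
      · rw [dif_neg hj]
  exact key _ j le_rfl h

theorem pvGoRight_eq_coe (arr : List Int) (x : Int) (j m0 : Nat) (hj : j ≤ m0)
    (hm0 : m0 < arr.length) (hlt : arr.getD m0 0 < x)
    (hb : ∀ m : Nat, j ≤ m → m < m0 → x ≤ arr.getD m 0) :
    pvGoRight arr x j = (m0 : Int) := by
  have key : ∀ (c j : Nat), arr.length - j ≤ c → j ≤ m0 →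
      (∀ m : Nat, j ≤ m → m < m0 → x ≤ arr.getD m 0) → pvGoRight arr x j = (m0 : Int) := by
    intro c
    induction c with
    | zero => intro j hc hjm hb'; omega
    | succ c ih =>
      intro j hc hjm hb'
      rw [pvGoRight, dif_pos (by omega)]
      by_cases hjq : j = m0
      · subst hjq; rw [if_neg (not_le.mpr hlt)]
      · rw [if_pos (hb' j le_rfl (by omega))]
        exact ih (j + 1) (by omega) (by omega) (fun m hm1 hm2 => hb' m (by omega) hm2)
  exact key _ j le_rfl hj hb

theorem pvGoRight_spec (arr : List Int) (x : Int) (j : Nat) :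
    (pvGoRight arr x j = -1 ∧ ∀ m : Nat, j ≤ m → m < arr.length → x ≤ arr.getD m 0) ∨
    (∃ m0 : Nat, pvGoRight arr x j = ↑m0 ∧ j ≤ m0 ∧ m0 < arr.length ∧ arr.getD m0 0 < x ∧
      ∀ m : Nat, j ≤ m → m < m0 → x ≤ arr.getD m 0) := by
  have key : ∀ (c j : Nat), arr.length - j ≤ c →
      (pvGoRight arr x j = -1 ∧ ∀ m : Nat, j ≤ m → m < arr.length → x ≤ arr.getD m 0) ∨
      (∃ m0 : Nat, pvGoRight arr x j = ↑m0 ∧ j ≤ m0 ∧ m0 < arr.length ∧ arr.getD m0 0 < x ∧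
        ∀ m : Nat, j ≤ m → m < m0 → x ≤ arr.getD m 0) := by
    intro c
    induction c with
    | zero =>
      intro j hc
      exact Or.inl ⟨by rw [pvGoRight, dif_neg (by omega)], fun m h1 h2 => by omega⟩
    | succ c ih =>
      intro j hc
      by_cases hj : j < arr.length
      · by_cases hx : x ≤ arr.getD j 0
        · have heq : pvGoRight arr x j = pvGoRight arr x (j + 1) := by
            rw [pvGoRight, dif_pos hj, if_pos hx]
          rcases ih (j + 1) (by omega) with ⟨h1, h2⟩ | ⟨m0, h1, h2, h3, h4, h5⟩
          · refine Or.inl ⟨heq.trans h1, fun m hm1 hm2 => ?_⟩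
            by_cases hmj : m = j
            · subst hmj; exact hx
            · exact h2 m (by omega) hm2
          · refine Or.inr ⟨m0, heq.trans h1, by omega, h3, h4, fun m hm1 hm2 => ?_⟩
            by_cases hmj : m = j
            · subst hmj; exact hx
            · exact h5 m (by omega) hm2
        · refine Or.inr ⟨j, ?_, le_rfl, hj, not_le.mp hx, fun m h1 h2 => by omega⟩
          rw [pvGoRight, dif_pos hj, if_neg hx]
      · exact Or.inl ⟨by rw [pvGoRight, dif_neg hj], fun m h1 h2 => by omega⟩
  exact key _ j le_rfl

theorem pvR0_eq_neg (arr : List Int) (x : Int) (j : Nat)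
    (h : ∀ m : Nat, j ≤ m → m < arr.length → x < arr.getD m 0) : pvR0 arr x j = -1 := by
  have key : ∀ (c j : Nat), arr.length - j ≤ c →
      (∀ m : Nat, j ≤ m → m < arr.length → x < arr.getD m 0) → pvR0 arr x j = -1 := by
    intro c
    induction c with
    | zero => intro j hc h; rw [pvR0, dif_neg (by omega)]
    | succ c ih =>
      intro j hc h
      rw [pvR0]
      by_cases hj : j < arr.length
      · rw [dif_pos hj, if_neg (not_le.mpr (h j le_rfl hj))]
        exact ih (j + 1) (by omega) (fun m hm1 hm2 => h m (by omega) hm2)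
      · rw [dif_neg hj]
  exact key _ j le_rfl h

theorem pvR0_eq_coe (arr : List Int) (x : Int) (j m0 : Nat) (hj : j ≤ m0)
    (hm0 : m0 < arr.length) (hle : arr.getD m0 0 ≤ x)
    (hb : ∀ m : Nat, j ≤ m → m < m0 → x < arr.getD m 0) :
    pvR0 arr x j = (m0 : Int) := by
  have key : ∀ (c j : Nat), arr.length - j ≤ c → j ≤ m0 →
      (∀ m : Nat, j ≤ m → m < m0 → x < arr.getD m 0) → pvR0 arr x j = (m0 : Int) := by
    intro c
    induction c with
    | zero => intro j hc hjm hb'; omega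
    | succ c ih =>
      intro j hc hjm hb'
      rw [pvR0, dif_pos (by omega)]
      by_cases hjq : j = m0
      · subst hjq; rw [if_pos hle]
      · rw [if_neg (not_le.mpr (hb' j le_rfl (by omega)))]
        exact ih (j + 1) (by omega) (by omega) (fun m hm1 hm2 => hb' m (by omega) hm2)
  exact key _ j le_rfl hj hb

theorem pvR0_spec (arr : List Int) (x : Int) (j : Nat) :
    (pvR0 arr x j = -1 ∧ ∀ m : Nat, j ≤ m → m < arr.length → x < arr.getD m 0) ∨
    (∃ m0 : Nat, pvR0 arr x j = ↑m0 ∧ j ≤ m0 ∧ m0 < arr.length ∧ arr.getD m0 0 ≤ x ∧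
      ∀ m : Nat, j ≤ m → m < m0 → x < arr.getD m 0) := by
  have key : ∀ (c j : Nat), arr.length - j ≤ c →
      (pvR0 arr x j = -1 ∧ ∀ m : Nat, j ≤ m → m < arr.length → x < arr.getD m 0) ∨
      (∃ m0 : Nat, pvR0 arr x j = ↑m0 ∧ j ≤ m0 ∧ m0 < arr.length ∧ arr.getD m0 0 ≤ x ∧
        ∀ m : Nat, j ≤ m → m < m0 → x < arr.getD m 0) := by
    intro c
    induction c with
    | zero =>
      intro j hc
      exact Or.inl ⟨by rw [pvR0, dif_neg (by omega)], fun m h1 h2 => by omega⟩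
    | succ c ih =>
      intro j hc
      by_cases hj : j < arr.length
      · by_cases hx : arr.getD j 0 ≤ x
        · refine Or.inr ⟨j, ?_, le_rfl, hj, hx, fun m h1 h2 => by omega⟩
          rw [pvR0, dif_pos hj, if_pos hx]
        · have heq : pvR0 arr x j = pvR0 arr x (j + 1) := by
            rw [pvR0, dif_pos hj, if_neg hx]
          rcases ih (j + 1) (by omega) with ⟨h1, h2⟩ | ⟨m0, h1, h2, h3, h4, h5⟩
          · refine Or.inl ⟨heq.trans h1, fun m hm1 hm2 => ?_⟩
            by_cases hmj : m = j
            · subst hmj; exact not_le.mp hx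
            · exact h2 m (by omega) hm2
          · refine Or.inr ⟨m0, heq.trans h1, by omega, h3, h4, fun m hm1 hm2 => ?_⟩
            by_cases hmj : m = j
            · subst hmj; exact not_le.mp hx
            · exact h5 m (by omega) hm2
      · exact Or.inl ⟨by rw [pvR0, dif_neg hj], fun m h1 h2 => by omega⟩
  exact key _ j le_rfl

-- ----- small list facts -----

theorem pv_mem_takeWhile_mem {α : Type} (p : α → Bool) (l : List α) (x : α)
    (h : x ∈ l.takeWhile p) : x ∈ l :=
  (List.takeWhile_sublist p).mem h

theorem pv_mem_dropWhile {α : Type} (p : α → Bool) (l : List α) (x : α)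
    (h : x ∈ l) (h2 : p x = false) : x ∈ l.dropWhile p := by
  have := List.takeWhile_append_dropWhile (p := p) (l := l)
  rw [← this] at h
  rcases List.mem_append.1 h with h' | h'
  · exact absurd (List.mem_takeWhile_imp h') (by simp [h2])
  · exact h'

theorem pv_dropWhile_head_false {α : Type} (p : α → Bool) (l : List α) (x : α) (xs : List α)
    (h : l.dropWhile p = x :: xs) : p x = false := by
  induction l with
  | nil => simp at h
  | cons a l ih =>
    by_cases hp : p a
    · rw [List.dropWhile_cons_of_pos hp] at h; exact ih h
    · rw [List.dropWhile_cons_of_neg hp] at h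
      cases h; simpa using hp

-- ----- the last index of minimal value on an interval -----

theorem pv_exists_last_min (a : Nat → Int) (lo hi : Nat) (h : lo < hi) :
    ∃ m, lo ≤ m ∧ m < hi ∧ (∀ p, lo ≤ p → p < hi → a m ≤ a p) ∧
      (∀ p, m < p → p < hi → a m < a p) := by
  induction hi with
  | zero => omega
  | succ hi ih =>
    by_cases hlo : lo = hi
    · exact ⟨lo, le_refl lo, by omega, fun p h1 h2 => by
        have : p = lo := by omega
        simp [this], fun p h1 h2 => by omega⟩
    · obtain ⟨m, hm1, hm2, hmin, hlast⟩ := ih (by omega)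
      by_cases hc : a hi ≤ a m
      · exact ⟨hi, by omega, by omega,
          fun p h1 h2 => by
            by_cases hp : p = hi
            · simp [hp]
            · exact le_trans hc (hmin p h1 (by omega)),
          fun p h1 h2 => by omega⟩
      · exact ⟨m, hm1, by omega,
          fun p h1 h2 => by
            by_cases hp : p = hi
            · subst hp; omega
            · exact hmin p h1 (by omega),
          fun p h1 h2 => by
            by_cases hp : p = hi
            · subst hp; omega
            · exact hlast p h1 (by omega)⟩

-- if no stack member lies in [lo, k) then no value there is below arr[k]
theorem pv_ge_of_no_between (arr : List Int) (i k lo : Nat) (hk : pvInS arr i k)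
    (hno : ∀ m : Nat, lo ≤ m → m < k → ¬ pvInS arr i m) :
    ∀ m : Nat, lo ≤ m → m < k → arr.getD k 0 ≤ arr.getD m 0 := by
  obtain ⟨hki, hkb⟩ := hk
  intro m hm1 hm2
  by_contra hcon
  push Not at hcon
  obtain ⟨m', h1, h2, hmin, hlast⟩ := pv_exists_last_min (fun j => arr.getD j 0) lo k (by omega)
  refine hno m' h1 h2 ⟨by omega, ?_⟩
  intro p hp1 hp2
  by_cases hpk : p < k
  · exact hlast p hp1 hpk
  · by_cases hpk' : p = k
    · subst hpk'
      exact lt_of_le_of_lt (hmin m hm1 hm2) hcon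
    · calc arr.getD m' 0 ≤ arr.getD m 0 := hmin m hm1 hm2
        _ < arr.getD k 0 := hcon
        _ < arr.getD p 0 := hkb p (by omega) hp2

theorem pvInS_restrict (arr : List Int) (i k : Nat) (h : pvInS arr (i + 1) k) (hk : k < i) :
    pvInS arr i k := ⟨hk, fun m h1 h2 => h.2 m h1 (by omega)⟩

theorem pvInS_succ_self (arr : List Int) (i : Nat) : pvInS arr (i + 1) i :=
  ⟨by omega, fun m h1 h2 => by omega⟩

theorem pvInS_mono_not (arr : List Int) (i k : Nat) (h : ¬ pvInS arr i k) (hk : k < i) :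
    ¬ pvInS arr (i + 1) k := fun hS => h (pvInS_restrict arr i k hS hk)

theorem pvInS_extend (arr : List Int) (i k : Nat) (h : pvInS arr i k)
    (hlt : arr.getD k 0 < arr.getD i 0) : pvInS arr (i + 1) k := by
  obtain ⟨hk1, hk2⟩ := h
  refine ⟨by omega, fun m h1 h2 => ?_⟩
  by_cases hm : m = i
  · subst hm; exact hlt
  · exact hk2 m h1 (by omega)

theorem pvAnsP_push (arr : List Int) (i : Nat) (ans : PySem.Dict Int (Int × Int × Int))
    (hA : pvAnsP arr i ans) (hiff : ∀ k : Nat, k < i → (pvInS arr i k ↔ pvInS arr (i + 1) k)) :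
    pvAnsP arr (i + 1) ans := by
  constructor
  · intro k hk hnS
    by_cases hki : k = i
    · subst hki; exact absurd (pvInS_succ_self arr _) hnS
    · have hki' : k < i := by omega
      exact hA.1 k hki' (fun hS => hnS ((hiff k hki').1 hS))
  · intro q hq
    apply hA.2
    rintro ⟨k, rfl, hk, hnS⟩
    exact hq ⟨k, rfl, by omega, fun hS => hnS ((hiff k hk).2 hS)⟩

-- the "left" value stored when k is popped is B's left scan
theorem pv_left_of_split (arr : List Int) (i : Nat) (P rest : List Nat) (k : Nat)
    (hpw : (P ++ k :: rest).Pairwise (· > ·))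
    (hmem : ∀ m : Nat, m ∈ P ++ k :: rest ↔ pvInS arr i m) :
    pvGoLeft arr (arr.getD k 0) k = pvLeftTop (rest.map (pvPair arr)) := by
  have hkS : pvInS arr i k := (hmem k).1 (by simp)
  have hPk : ∀ m ∈ P, m > k := fun m hm =>
    (List.pairwise_append.1 hpw).2.2 m hm k (by simp)
  cases rest with
  | nil =>
    simp only [List.map_nil, pvLeftTop]
    apply pvGoLeft_eq_neg
    intro j hj
    refine pv_ge_of_no_between arr i k 0 hkS ?_ j (Nat.zero_le j) hj
    intro m hm1 hm2 hmS
    rcases List.mem_append.1 ((hmem m).2 hmS) with hP | hK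
    · have := hPk m hP; omega
    · simp at hK; omega
  | cons j rest' =>
    have hjS : pvInS arr i j := (hmem j).1 (by simp)
    simp only [List.map_cons, pvLeftTop, pvPair]
    have hpw2 : (k :: j :: rest').Pairwise (· > ·) := (List.pairwise_append.1 hpw).2.1
    have hkj : k > j := (List.pairwise_cons.1 hpw2).1 j (by simp)
    have hjr : ∀ m ∈ rest', j > m := (List.pairwise_cons.1 (List.pairwise_cons.1 hpw2).2).1
    apply pvGoLeft_eq_coe arr _ j k hkj (hjS.2 k hkj hkS.1)
    intro m h1 h2
    refine pv_ge_of_no_between arr i k (j + 1) hkS ?_ m (by omega) h2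
    intro m' hm1 hm2 hmS
    rcases List.mem_append.1 ((hmem m').2 hmS) with hP | hK
    · have := hPk m' hP; omega
    · rcases List.mem_cons.1 hK with h | h
      · omega
      · rcases List.mem_cons.1 h with h' | h'
        · omega
        · have := hjr m' h'; omega

-- ----- the pop loop -----

theorem pvPopLoop_spec (arr : List Int) (i : Nat) :
    ∀ (S P : List Nat) (ans : PySem.Dict Int (Int × Int × Int)),
      (P ++ S).Pairwise (· > ·) → (∀ m : Nat, m ∈ P ++ S ↔ pvInS arr i m) →
      (pvPopLoop ↑i (arr.getD i 0) (S.map (pvPair arr)) ans).1 =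
        (S.dropWhile (fun k => decide (arr.getD i 0 ≤ arr.getD k 0))).map (pvPair arr) ∧
      (∀ k ∈ S.takeWhile (fun k => decide (arr.getD i 0 ≤ arr.getD k 0)),
        (pvPopLoop ↑i (arr.getD i 0) (S.map (pvPair arr)) ans).2.get? ↑k =
          some (pvGoLeft arr (arr.getD k 0) k, ↑i, arr.getD k 0)) ∧
      (∀ q : Int, (∀ k ∈ S.takeWhile (fun k => decide (arr.getD i 0 ≤ arr.getD k 0)), q ≠ ↑k) →
        (pvPopLoop ↑i (arr.getD i 0) (S.map (pvPair arr)) ans).2.get? q = ans.get? q) := by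
  intro S
  induction S with
  | nil =>
    intro P ans hpw hmem
    exact ⟨rfl, by simp, fun q hq => rfl⟩
  | cons k0 S2 ih =>
    intro P ans hpw hmem
    have hk0S2 : ∀ m ∈ S2, k0 > m :=
      (List.pairwise_cons.1 (List.pairwise_append.1 hpw).2.1).1
    by_cases hc : arr.getD i 0 ≤ arr.getD k0 0
    · have hstep : pvPopLoop ↑i (arr.getD i 0) ((k0 :: S2).map (pvPair arr)) ans =
          pvPopLoop ↑i (arr.getD i 0) (S2.map (pvPair arr))
            (ans.insert ↑k0 (pvLeftTop (S2.map (pvPair arr)), ↑i, arr.getD k0 0)) := by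
        simp only [List.map_cons, pvPair, pvPopLoop]
        rw [if_pos hc]
      have hL : pvGoLeft arr (arr.getD k0 0) k0 = pvLeftTop (S2.map (pvPair arr)) :=
        pv_left_of_split arr i P S2 k0 hpw hmem
      have hass : P ++ k0 :: S2 = (P ++ [k0]) ++ S2 := by simp
      obtain ⟨ih1, ih2, ih3⟩ := ih (P ++ [k0])
        (ans.insert ↑k0 (pvLeftTop (S2.map (pvPair arr)), ↑i, arr.getD k0 0))
        (by rw [← hass]; exact hpw) (by rw [← hass]; exact hmem)
      have htw : (k0 :: S2).takeWhile (fun k => decide (arr.getD i 0 ≤ arr.getD k 0)) =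
          k0 :: S2.takeWhile (fun k => decide (arr.getD i 0 ≤ arr.getD k 0)) :=
        List.takeWhile_cons_of_pos (by simpa using hc)
      refine ⟨?_, ?_, ?_⟩
      · rw [hstep, ih1, List.dropWhile_cons_of_pos (by simpa using hc)]
      · intro k hk
        rw [htw] at hk
        rcases List.mem_cons.1 hk with rfl | hk2
        · rw [hstep, ih3 ↑k (fun k' hk' => by
            have := hk0S2 k' (pv_mem_takeWhile_mem _ _ _ hk')
            intro heq
            have : k = k' := by exact_mod_cast heq
            omega), PySem.Dict.get?_insert_self, ← hL]
        · exact hstep ▸ ih2 k hk2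
      · intro q hq
        rw [htw] at hq
        have hq0 : q ≠ ↑k0 := hq k0 (by simp)
        rw [hstep, ih3 q (fun k' hk' => hq k' (List.mem_cons_of_mem _ hk')),
          PySem.Dict.get?_insert_of_ne _ _ hq0]
    · have hstep : pvPopLoop ↑i (arr.getD i 0) ((k0 :: S2).map (pvPair arr)) ans =
          ((k0 :: S2).map (pvPair arr), ans) := by
        simp only [List.map_cons, pvPair, pvPopLoop]
        rw [if_neg hc]
      refine ⟨?_, ?_, fun q _ => by rw [hstep]⟩
      · rw [hstep, List.dropWhile_cons_of_neg (by simpa using hc)]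
      · intro k hk
        rw [List.takeWhile_cons_of_neg (by simpa using hc)] at hk
        simp at hk

-- ----- the drain loop -----

theorem pvDrain_spec (arr : List Int) (i : Nat) :
    ∀ (S P : List Nat) (ans : PySem.Dict Int (Int × Int × Int)),
      (P ++ S).Pairwise (· > ·) → (∀ m : Nat, m ∈ P ++ S ↔ pvInS arr i m) →
      (∀ k ∈ S, (pvDrain (S.map (pvPair arr)) ans).get? ↑k =
        some (pvGoLeft arr (arr.getD k 0) k, -1, arr.getD k 0)) ∧
      (∀ q : Int, (∀ k ∈ S, q ≠ ↑k) → (pvDrain (S.map (pvPair arr)) ans).get? q = ans.get? q) := by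
  intro S
  induction S with
  | nil =>
    intro P ans hpw hmem
    exact ⟨by simp, fun q hq => rfl⟩
  | cons k0 S2 ih =>
    intro P ans hpw hmem
    have hk0S2 : ∀ m ∈ S2, k0 > m :=
      (List.pairwise_cons.1 (List.pairwise_append.1 hpw).2.1).1
    have hstep : pvDrain ((k0 :: S2).map (pvPair arr)) ans =
        pvDrain (S2.map (pvPair arr))
          (ans.insert ↑k0 (pvLeftTop (S2.map (pvPair arr)), -1, arr.getD k0 0)) := by
      simp only [List.map_cons, pvPair, pvDrain]
    have hL : pvGoLeft arr (arr.getD k0 0) k0 = pvLeftTop (S2.map (pvPair arr)) :=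
      pv_left_of_split arr i P S2 k0 hpw hmem
    have hass : P ++ k0 :: S2 = (P ++ [k0]) ++ S2 := by simp
    obtain ⟨ih1, ih2⟩ := ih (P ++ [k0])
      (ans.insert ↑k0 (pvLeftTop (S2.map (pvPair arr)), -1, arr.getD k0 0))
      (by rw [← hass]; exact hpw) (by rw [← hass]; exact hmem)
    refine ⟨?_, ?_⟩
    · intro k hk
      rcases List.mem_cons.1 hk with rfl | hk2
      · rw [hstep, ih2 ↑k (fun k' hk' => by
          have := hk0S2 k' hk'
          intro heq
          have : k = k' := by exact_mod_cast heq
          omega), PySem.Dict.get?_insert_self, ← hL]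
      · exact hstep ▸ ih1 k hk2
    · intro q hq
      have hq0 : q ≠ ↑k0 := hq k0 (by simp)
      rw [hstep, ih2 q (fun k' hk' => hq k' (List.mem_cons_of_mem _ hk')),
        PySem.Dict.get?_insert_of_ne _ _ hq0]

-- ----- one step of the forward pass preserves the invariant -----

theorem pvStep_inv (arr : List Int) (i : Nat) (hi : i < arr.length)
    (record : List (Int × Int)) (ans : PySem.Dict Int (Int × Int × Int))
    (h : pvInv arr i record ans) :
    pvInv arr (i + 1) (pvStepA (record, ans) (↑i, arr.getD i 0)).1
      (pvStepA (record, ans) (↑i, arr.getD i 0)).2 := by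
  obtain ⟨S, hrec, hpw, hmem, hansP⟩ := h
  subst hrec
  cases S with
  | nil =>
    simp only [pvStepA, List.map_nil]
    refine ⟨[i], by simp [pvPair], List.pairwise_singleton _ _, ?_, ?_⟩
    · intro m
      constructor
      · intro hm
        simp at hm
        subst hm
        exact pvInS_succ_self arr _
      · intro hmS
        by_cases hmi : m = i
        · simp [hmi]
        · have hmi' : m < i := by
            have := hmS.1; omega
          exact absurd ((hmem m).2 (pvInS_restrict arr i m hmS hmi')) (by simp)
    · refine pvAnsP_push arr i ans hansP (fun k hk => ?_)
      constructor
      · intro hS; exact absurd ((hmem k).2 hS) (by simp)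
      · intro hS; exact absurd ((hmem k).2 (pvInS_restrict arr i k hS hk)) (by simp)
  | cons t S2 =>
    have htS : pvInS arr i t := (hmem t).1 (by simp)
    have htS2 : ∀ m ∈ S2, t > m := (List.pairwise_cons.1 hpw).1
    by_cases hbr : arr.getD t 0 < arr.getD i 0
    · -- push branch
      have hstep : pvStepA ((t :: S2).map (pvPair arr), ans) (↑i, arr.getD i 0) =
          ((↑i, arr.getD i 0) :: (t :: S2).map (pvPair arr), ans) := by
        simp only [List.map_cons, pvPair, pvStepA]
        rw [if_pos hbr]
      rw [hstep]
      have hval : ∀ m ∈ t :: S2, arr.getD m 0 < arr.getD i 0 := by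
        intro m hm
        rcases List.mem_cons.1 hm with rfl | hm2
        · exact hbr
        · have hmS : pvInS arr i m := (hmem m).1 hm
          exact lt_trans (hmS.2 t (htS2 m hm2) htS.1) hbr
      have hiff : ∀ k : Nat, k < i → (pvInS arr i k ↔ pvInS arr (i + 1) k) := by
        intro k hk
        constructor
        · intro hS
          exact pvInS_extend arr i k hS (hval k ((hmem k).2 hS))
        · intro hS
          exact pvInS_restrict arr i k hS hk
      refine ⟨i :: t :: S2, by simp [pvPair], ?_, ?_, pvAnsP_push arr i ans hansP hiff⟩
      · refine List.pairwise_cons.2 ⟨fun b hb => ((hmem b).1 hb).1, hpw⟩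
      · intro m
        constructor
        · intro hm
          rcases List.mem_cons.1 hm with rfl | hm2
          · exact pvInS_succ_self arr _
          · exact (hiff m ((hmem m).1 hm2).1).1 ((hmem m).1 hm2)
        · intro hmS
          by_cases hmi : m = i
          · simp [hmi]
          · have hmi' : m < i := by
              have := hmS.1; omega
            exact List.mem_cons_of_mem _ ((hmem m).2 (pvInS_restrict arr i m hmS hmi'))
    · -- pop branch
      obtain ⟨h1, h2, h3⟩ := pvPopLoop_spec arr i (t :: S2) [] ans hpw hmem
      have hstep : pvStepA ((t :: S2).map (pvPair arr), ans) (↑i, arr.getD i 0) =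
          ((↑i, arr.getD i 0) ::
            (pvPopLoop ↑i (arr.getD i 0) ((t :: S2).map (pvPair arr)) ans).1,
           (pvPopLoop ↑i (arr.getD i 0) ((t :: S2).map (pvPair arr)) ans).2) := by
        simp only [List.map_cons, pvPair, pvStepA]
        rw [if_neg hbr]
      rw [hstep, h1]
      have hS'sub : ∀ m ∈ (t :: S2).dropWhile (fun k : Nat => decide (arr.getD i 0 ≤ arr.getD k 0)),
          m ∈ t :: S2 :=
        fun m hm => (List.dropWhile_sublist _).subset hm
      have hS'pw : ((t :: S2).dropWhile (fun k : Nat => decide (arr.getD i 0 ≤ arr.getD k 0))).Pairwise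
          (· > ·) := hpw.sublist (List.dropWhile_sublist _)
      have hS'lt : ∀ m ∈ (t :: S2).dropWhile (fun k : Nat => decide (arr.getD i 0 ≤ arr.getD k 0)),
          arr.getD m 0 < arr.getD i 0 := by
        intro m hm
        rcases hhd : (t :: S2).dropWhile (fun k : Nat => decide (arr.getD i 0 ≤ arr.getD k 0)) with
          _ | ⟨h0, tl⟩
        · rw [hhd] at hm; simp at hm
        · have hh0f := pv_dropWhile_head_false _ (t :: S2) h0 tl hhd
          have hh0lt : arr.getD h0 0 < arr.getD i 0 := by
            simpa using hh0f
          rw [hhd] at hm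
          rcases List.mem_cons.1 hm with rfl | hm2
          · exact hh0lt
          · have hh0S : pvInS arr i h0 := (hmem h0).1 (hS'sub h0 (by rw [hhd]; simp))
            have hmS : pvInS arr i m := (hmem m).1 (hS'sub m (by rw [hhd]; simp [hm2]))
            have hgt : h0 > m := by
              have := (List.pairwise_cons.1 (hhd ▸ hS'pw)).1
              exact this m hm2
            exact lt_trans (hmS.2 h0 hgt hh0S.1) hh0lt
      have hmem' : ∀ m : Nat,
          m ∈ (t :: S2).dropWhile (fun k : Nat => decide (arr.getD i 0 ≤ arr.getD k 0)) ↔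
          (pvInS arr (i + 1) m ∧ m ≠ i) := by
        intro m
        constructor
        · intro hm
          have hmS : pvInS arr i m := (hmem m).1 (hS'sub m hm)
          exact ⟨pvInS_extend arr i m hmS (hS'lt m hm), by have := hmS.1; omega⟩
        · rintro ⟨hmS, hmi⟩
          have hmi' : m < i := by have := hmS.1; omega
          have hold : pvInS arr i m := pvInS_restrict arr i m hmS hmi'
          refine pv_mem_dropWhile _ _ m ((hmem m).2 hold) ?_
          have : arr.getD m 0 < arr.getD i 0 := hmS.2 i hmi' (by omega)
          simpa using this
      have hTkill : ∀ k ∈ (t :: S2).takeWhile (fun k : Nat => decide (arr.getD i 0 ≤ arr.getD k 0)),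
          k < i ∧ pvInS arr i k ∧ arr.getD i 0 ≤ arr.getD k 0 ∧ ¬ pvInS arr (i + 1) k := by
        intro k hk
        have hkS : pvInS arr i k := (hmem k).1 (pv_mem_takeWhile_mem _ _ _ hk)
        have hle : arr.getD i 0 ≤ arr.getD k 0 := by
          simpa using List.mem_takeWhile_imp hk
        refine ⟨hkS.1, hkS, hle, fun hS => ?_⟩
        have := hS.2 i hkS.1 (by omega)
        omega
      refine ⟨i :: (t :: S2).dropWhile (fun k : Nat => decide (arr.getD i 0 ≤ arr.getD k 0)),
        by simp [pvPair], ?_, ?_, ?_, ?_⟩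
      · refine List.pairwise_cons.2 ⟨fun b hb => ((hmem b).1 (hS'sub b hb)).1, hS'pw⟩
      · intro m
        constructor
        · intro hm
          rcases List.mem_cons.1 hm with rfl | hm2
          · exact pvInS_succ_self arr _
          · exact ((hmem' m).1 hm2).1
        · intro hmS
          by_cases hmi : m = i
          · simp [hmi]
          · exact List.mem_cons_of_mem _ ((hmem' m).2 ⟨hmS, hmi⟩)
      · -- entries
        intro k hk hnS
        by_cases hki : k = i
        · subst hki; exact absurd (pvInS_succ_self arr _) hnS
        · have hki' : k < i := by omega
          by_cases hkT : k ∈ (t :: S2).takeWhile (fun k : Nat => decide (arr.getD i 0 ≤ arr.getD k 0))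
          · obtain ⟨_, hkS, hle, _⟩ := hTkill k hkT
            rw [h2 k hkT]
            have hr0 : pvR0 arr (arr.getD k 0) (k + 1) = (↑i : Int) :=
              pvR0_eq_coe arr (arr.getD k 0) (k + 1) i (by omega) hi hle
                (fun m hm1 hm2 => hkS.2 m (by omega) hm2)
            rw [hr0]
          · have hkS' : k ∉ (t :: S2).dropWhile (fun k : Nat => decide (arr.getD i 0 ≤ arr.getD k 0)) :=
              fun hin => hnS ((hmem' k).1 hin).1
            have hkS : k ∉ t :: S2 := by
              intro hin
              rw [← List.takeWhile_append_dropWhile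
                (p := fun k : Nat => decide (arr.getD i 0 ≤ arr.getD k 0)) (l := t :: S2)] at hin
              rcases List.mem_append.1 hin with h | h
              · exact hkT h
              · exact hkS' h
            have hold : ¬ pvInS arr i k := fun hS => hkS ((hmem k).2 hS)
            rw [h3 ↑k (fun k' hk' => ?_)]
            · exact hansP.1 k hki' hold
            · intro heq
              have : k = k' := by exact_mod_cast heq
              subst this
              exact hkS (pv_mem_takeWhile_mem _ _ _ hk')
      · -- none entries
        intro q hq
        rw [h3 q (fun k' hk' => ?_)]
        · apply hansP.2
          rintro ⟨k, rfl, hk, hnS⟩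
          exact hq ⟨k, rfl, by omega, pvInS_mono_not arr i k hnS hk⟩
        · obtain ⟨hk1, _, _, hk4⟩ := hTkill k' hk'
          intro heq
          exact hq ⟨k', heq, by omega, hk4⟩

theorem pvFold_inv (arr : List Int) :
    ∀ (c i : Nat) (st : List (Int × Int) × PySem.Dict Int (Int × Int × Int)),
      i + c = arr.length → pvInv arr i st.1 st.2 →
      pvInv arr arr.length
        (((List.range' i c).map (fun k : Nat => ((k : Int), arr.getD k 0))).foldl pvStepA st).1
        (((List.range' i c).map (fun k : Nat => ((k : Int), arr.getD k 0))).foldl pvStepA st).2 := by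
  intro c
  induction c with
  | zero =>
    intro i st hc h
    have : i = arr.length := by omega
    subst this
    simpa using h
  | succ c ih =>
    intro i st hc h
    rw [List.range'_succ, List.map_cons, List.foldl_cons]
    refine ih (i + 1) (pvStepA st (↑i, arr.getD i 0)) (by omega) ?_
    have := pvStep_inv arr i (by omega) st.1 st.2 h
    simpa using this

theorem pv_enum_eq (arr : List Int) :
    PySem.List.enumerate arr = (List.range arr.length).map (fun k : Nat => ((k : Int), arr.getD k 0)) := by
  rw [PySem.List.enumerate_eq_map_pyRange (d := 0), PySem.List.pyRange_one]
  simp [PySem.List.len_eq, List.map_map, Function.comp]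

-- after the forward pass and the drain, every index holds (left scan, first ≤ scan, value)
theorem pvForward (arr : List Int) :
    (∀ k : Nat, k < arr.length →
      (pvDrain ((PySem.List.enumerate arr).foldl pvStepA ([], PySem.Dict.empty)).1
          ((PySem.List.enumerate arr).foldl pvStepA ([], PySem.Dict.empty)).2).get? ↑k =
        some (pvGoLeft arr (arr.getD k 0) k, pvR0 arr (arr.getD k 0) (k + 1), arr.getD k 0)) ∧
    (∀ q : Int, (¬ ∃ k : Nat, q = ↑k ∧ k < arr.length) →
      (pvDrain ((PySem.List.enumerate arr).foldl pvStepA ([], PySem.Dict.empty)).1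
          ((PySem.List.enumerate arr).foldl pvStepA ([], PySem.Dict.empty)).2).get? q = none) := by
  have hinv0 : pvInv arr 0 ([] : List (Int × Int)) PySem.Dict.empty := by
    refine ⟨[], by simp, by simp, ?_, ?_, ?_⟩
    · intro m
      simp only [List.not_mem_nil, false_iff]
      intro hS
      exact absurd hS.1 (by omega)
    · intro k hk
      omega
    · intro q hq
      exact PySem.Dict.get?_empty q
  have henum : PySem.List.enumerate arr =
      (List.range' 0 arr.length).map (fun k : Nat => ((k : Int), arr.getD k 0)) := by
    rw [pv_enum_eq, List.range_eq_range']
  have hfold := pvFold_inv arr arr.length 0 ([], PySem.Dict.empty) (by omega) hinv0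
  rw [henum]
  obtain ⟨S, hrec, hpw, hmem, hansP⟩ := hfold
  obtain ⟨hdr1, hdr2⟩ := pvDrain_spec arr arr.length S [] _ hpw hmem
  simp only [hrec]
  constructor
  · intro k hk
    by_cases hkS : k ∈ S
    · rw [hdr1 k hkS]
      have hkInS : pvInS arr arr.length k := (hmem k).1 hkS
      have : pvR0 arr (arr.getD k 0) (k + 1) = -1 :=
        pvR0_eq_neg arr (arr.getD k 0) (k + 1) (fun m hm1 hm2 => hkInS.2 m (by omega) hm2)
      rw [this]
    · rw [hdr2 ↑k (fun k' hk' => ?_)]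
      · exact hansP.1 k hk (fun hS => hkS ((hmem k).2 hS))
      · intro heq
        have : k = k' := by exact_mod_cast heq
        subst this
        exact hkS hk'
  · intro q hq
    rw [hdr2 q (fun k' hk' => ?_)]
    · apply hansP.2
      rintro ⟨k, rfl, hk, _⟩
      exact hq ⟨k, rfl, hk⟩
    · intro heq
      have hk'S : pvInS arr arr.length k' := (hmem k').1 hk'
      exact hq ⟨k', heq, hk'S.1⟩

-- ----- the chain walk -----

theorem pvQ_of_spec (arr : List Int) (j m0 : Nat) (hjm : j ≤ m0) (hm0 : m0 < arr.length)
    (heq : arr.getD m0 0 = arr.getD j 0)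
    (hbet : ∀ m : Nat, j < m → m < m0 → arr.getD j 0 ≤ arr.getD m 0) (r : Int)
    (hr : r = pvR0 arr (arr.getD m0 0) (m0 + 1) ∨ r = pvGoRight arr (arr.getD m0 0) (m0 + 1)) :
    pvQ arr j r ∧ (r = -1 ∨ ∃ m1 : Nat, r = ↑m1 ∧ m0 < m1) := by
  rcases hr with rfl | rfl
  · rcases pvR0_spec arr (arr.getD m0 0) (m0 + 1) with ⟨h1, h2⟩ | ⟨m1, h1, h2, h3, h4, h5⟩
    · refine ⟨Or.inl ⟨h1, fun m hm1 hm2 => ?_⟩, Or.inl h1⟩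
      by_cases hmm : m ≤ m0
      · by_cases hme : m = m0
        · subst hme; omega
        · exact hbet m hm1 (by omega)
      · have := h2 m (by omega) hm2; omega
    · refine ⟨Or.inr ⟨m1, h1, by omega, h3, by omega, fun m hm1 hm2 => ?_⟩,
        Or.inr ⟨m1, h1, by omega⟩⟩
      by_cases hmm : m ≤ m0
      · by_cases hme : m = m0
        · subst hme; omega
        · exact hbet m hm1 (by omega)
      · have := h5 m (by omega) hm2; omega
  · rcases pvGoRight_spec arr (arr.getD m0 0) (m0 + 1) with ⟨h1, h2⟩ | ⟨m1, h1, h2, h3, h4, h5⟩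
    · refine ⟨Or.inl ⟨h1, fun m hm1 hm2 => ?_⟩, Or.inl h1⟩
      by_cases hmm : m ≤ m0
      · by_cases hme : m = m0
        · subst hme; omega
        · exact hbet m hm1 (by omega)
      · have := h2 m (by omega) hm2; omega
    · refine ⟨Or.inr ⟨m1, h1, by omega, h3, by omega, fun m hm1 hm2 => ?_⟩,
        Or.inr ⟨m1, h1, by omega⟩⟩
      by_cases hmm : m ≤ m0
      · by_cases hme : m = m0
        · subst hme; omega
        · exact hbet m hm1 (by omega)
      · have := h5 m (by omega) hm2; omega

theorem pvChase_correct (arr : List Int) (ans : PySem.Dict Int (Int × Int × Int))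
    (hM : pvMixed arr ans) (j : Nat) (_hj : j < arr.length) :
    ∀ (fuel : Nat) (r : Int), pvQ arr j r →
      (r = -1 ∨ (0 ≤ r ∧ arr.length ≤ fuel + r.toNat)) →
      pvChase arr ans fuel (arr.getD j 0) r = pvGoRight arr (arr.getD j 0) (j + 1) := by
  intro fuel
  induction fuel with
  | zero =>
    intro r hQ hf
    rcases hQ with ⟨rfl, hall⟩ | ⟨m0, rfl, hm1, hm2, hm3, hm4⟩
    · exact (pvGoRight_eq_neg arr (arr.getD j 0) (j + 1)
        (fun m h1 h2 => hall m (by omega) h2)).symm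
    · exfalso
      rcases hf with h | ⟨_, h⟩
      · omega
      · rw [Int.toNat_natCast] at h; omega
  | succ fuel ih =>
    intro r hQ hf
    rcases hQ with ⟨rfl, hall⟩ | ⟨m0, rfl, hm1, hm2, hm3, hm4⟩
    · simp only [pvChase, ne_eq, not_true_eq_false, if_false]
      exact (pvGoRight_eq_neg arr (arr.getD j 0) (j + 1)
        (fun m h1 h2 => hall m (by omega) h2)).symm
    · have hne : (↑m0 : Int) ≠ -1 := by omega
      simp only [pvChase]
      rw [if_pos hne]
      have hget : PySem.List.pyGet? arr (↑m0 : Int) = some (arr.getD m0 0) := by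
        rw [PySem.List.pyGet?_natCast, List.getElem?_eq_getElem hm2,
          List.getD_eq_getElem arr 0 hm2]
      rw [hget]
      dsimp only
      by_cases hv : arr.getD j 0 = arr.getD m0 0
      · rw [if_pos hv]
        obtain ⟨r', hr'get, hr'or⟩ := hM m0 hm2
        rw [hr'get]
        dsimp only
        obtain ⟨hQ', hstep⟩ := pvQ_of_spec arr j m0 (by omega) hm2 hv.symm hm4 r' hr'or
        have hfc : r' = -1 ∨ (0 ≤ r' ∧ arr.length ≤ fuel + r'.toNat) := by
          rcases hstep with rfl | ⟨m1, rfl, hm0m1⟩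
          · exact Or.inl rfl
          · refine Or.inr ⟨by omega, ?_⟩
            rw [Int.toNat_natCast]
            rcases hf with h | ⟨_, h⟩
            · omega
            · rw [Int.toNat_natCast] at h; omega
        rw [← hv]
        exact ih r' hQ' hfc
      · rw [if_neg hv]
        refine (pvGoRight_eq_coe arr (arr.getD j 0) (j + 1) m0 (by omega) hm2 ?_
          (fun m h1 h2 => hm4 m (by omega) h2)).symm
        exact lt_of_le_of_ne hm3 (fun h => hv h.symm)

-- ----- the fix-up pass -----

theorem pvFix_preserve (arr : List Int) :
    ∀ (ks : List Int) (ans : PySem.Dict Int (Int × Int × Int)) (q : Int), q ∉ ks →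
      (ks.foldl (pvFixStep arr) ans).get? q = ans.get? q := by
  intro ks
  induction ks with
  | nil => intro ans q hq; rfl
  | cons key tl ih =>
    intro ans q hq
    have hq1 : q ≠ key := fun h => hq (h ▸ List.mem_cons_self)
    have hq2 : q ∉ tl := fun h => hq (List.mem_cons_of_mem _ h)
    rw [List.foldl_cons, ih _ q hq2]
    unfold pvFixStep
    rcases hg : ans.get? key with _ | ⟨l, r, v⟩
    · rfl
    · exact PySem.Dict.get?_insert_of_ne _ _ hq1

theorem pvFixup_fold (arr : List Int) :
    ∀ (ks : List Int) (ans : PySem.Dict Int (Int × Int × Int)),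
      (∀ j ∈ ks, ∃ k : Nat, j = ↑k ∧ k < arr.length) → pvMixed arr ans →
      pvMixed arr (ks.foldl (pvFixStep arr) ans) ∧
      (∀ k : Nat, (↑k : Int) ∈ ks → (ks.foldl (pvFixStep arr) ans).get? ↑k =
        some (pvGoLeft arr (arr.getD k 0) k, pvGoRight arr (arr.getD k 0) (k + 1), arr.getD k 0)) := by
  intro ks
  induction ks with
  | nil => intro ans _ hM; exact ⟨hM, by simp⟩
  | cons key tl ih =>
    intro ans hks hM
    obtain ⟨k0, rfl, hk0⟩ := hks key List.mem_cons_self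
    obtain ⟨r, hget, hror⟩ := hM k0 hk0
    have hbet0 : ∀ m : Nat, k0 < m → m < k0 → arr.getD k0 0 ≤ arr.getD m 0 :=
      fun m h1 h2 => by omega
    obtain ⟨hQ0, hstep0⟩ := pvQ_of_spec arr k0 k0 le_rfl hk0 rfl hbet0 r hror
    have hchase : pvChase arr ans (arr.length + 1) (arr.getD k0 0) r =
        pvGoRight arr (arr.getD k0 0) (k0 + 1) := by
      refine pvChase_correct arr ans hM k0 hk0 _ r hQ0 ?_
      rcases hstep0 with rfl | ⟨m1, rfl, hm1⟩
      · exact Or.inl rfl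
      · refine Or.inr ⟨by omega, ?_⟩
        rw [Int.toNat_natCast]
        omega
    have hstep : pvFixStep arr ans ↑k0 = ans.insert ↑k0
        (pvGoLeft arr (arr.getD k0 0) k0, pvGoRight arr (arr.getD k0 0) (k0 + 1),
          arr.getD k0 0) := by
      unfold pvFixStep
      rw [hget]
      dsimp only
      rw [hchase]
    have hM' : pvMixed arr (ans.insert ↑k0
        (pvGoLeft arr (arr.getD k0 0) k0, pvGoRight arr (arr.getD k0 0) (k0 + 1),
          arr.getD k0 0)) := by
      intro k hk
      by_cases hkk : k = k0
      · subst hkk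
        exact ⟨pvGoRight arr (arr.getD k 0) (k + 1), PySem.Dict.get?_insert_self _ _ _, Or.inr rfl⟩
      · obtain ⟨r2, hg2, ho2⟩ := hM k hk
        refine ⟨r2, ?_, ho2⟩
        rw [PySem.Dict.get?_insert_of_ne _ _ (by
          intro heq
          exact hkk (by exact_mod_cast heq))]
        exact hg2
    obtain ⟨ihM, ihKeys⟩ := ih _ (fun j hj => hks j (List.mem_cons_of_mem _ hj)) hM'
    constructor
    · rw [List.foldl_cons, hstep]
      exact ihM
    · intro k hk
      rw [List.foldl_cons, hstep]
      rcases List.mem_cons.1 hk with heq | htl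
      · have hkk0 : k = k0 := by exact_mod_cast heq
        subst hkk0
        by_cases hmem2 : (↑k : Int) ∈ tl
        · exact ihKeys k hmem2
        · rw [pvFix_preserve arr tl _ ↑k hmem2]
          exact PySem.Dict.get?_insert_self _ _ _
      · exact ihKeys k htl

-- ----- the main equality -----

theorem pv_main (arr : List Int) : stack arr = stack_alt arr := by
  obtain ⟨hF1, hF2⟩ := pvForward arr
  simp only [stack, stack_alt]
  apply List.map_congr_left
  intro i hi
  rw [List.mem_range] at hi
  have hMix : pvMixed arr (pvDrain ((PySem.List.enumerate arr).foldl pvStepA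
      ([], PySem.Dict.empty)).1 ((PySem.List.enumerate arr).foldl pvStepA
      ([], PySem.Dict.empty)).2) :=
    fun k hk => ⟨pvR0 arr (arr.getD k 0) (k + 1), hF1 k hk, Or.inl rfl⟩
  have hks : ∀ j ∈ (pvDrain ((PySem.List.enumerate arr).foldl pvStepA
      ([], PySem.Dict.empty)).1 ((PySem.List.enumerate arr).foldl pvStepA
      ([], PySem.Dict.empty)).2).keys, ∃ k : Nat, j = ↑k ∧ k < arr.length := by
    intro j hj
    by_contra hno
    push Not at hno
    have hnone := hF2 j (by
      rintro ⟨k, rfl, hk⟩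
      exact absurd hk (by have := hno k rfl; omega))
    have hc := (PySem.Dict.contains_iff_mem_keys _ j).2 hj
    rw [PySem.Dict.contains_eq_isSome_get?, hnone] at hc
    simp at hc
  obtain ⟨_, hKeys⟩ := pvFixup_fold arr _ _ hks hMix
  have hmemk : (↑i : Int) ∈ (pvDrain ((PySem.List.enumerate arr).foldl pvStepA
      ([], PySem.Dict.empty)).1 ((PySem.List.enumerate arr).foldl pvStepA
      ([], PySem.Dict.empty)).2).keys := by
    refine (PySem.Dict.contains_iff_mem_keys _ _).1 ?_
    rw [PySem.Dict.contains_eq_isSome_get?, hF1 i hi]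
    rfl
  rw [hKeys i hmemk]

-- ===== VERDICT (by name: the statement is the Claim_ definition above) =====
theorem stack_spec : Claim_equal_stack := by
  intro arr _
  exact pv_main arr
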